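-- pv_equiv track=rewrite | github.com/erostedt/Misc | AntRandomWalk/clusters.py | ants_in_cluster
-- ===== SOURCE A (Python) =====
-- def ants_in_cluster(final_ant_pos, cluster_centers, size):
--     ants_in_clust = []
--     for cluster_center in cluster_centers:
--         temp = 0
--         for i in range(-1, 2):
--             for j in range(-1, 2):
--                 x = cluster_center[0] + i
--                 y = cluster_center[1] + j
--
--                 if x == -1:
--                     x = size - 1
--
--                 if x == size:
--                     x = 0
--                 elif x == size + 1:
--                     x = 1
--
--                 if y == -1:
--                     y = size - 1
--
--                 if y == size:
--                     y = 0
--                 elif y == size + 1: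
--                     y = 1
--
--                 for ant_pos in final_ant_pos:
--                     if ant_pos[0] == x and ant_pos[1] == y:
--                         temp += 1
--
--         ants_in_clust.append(temp)
--
--     return ants_in_clust
-- ===== SOURCE B (Python) =====
-- def ants_in_cluster(final_ant_pos, cluster_centers, size):
--     def wrap(v):
--         if v == -1:
--             v = size - 1
--         if v == size:
--             v = 0
--         elif v == size + 1:
--             v = 1
--         return v
--
--     # Inverted index: each cluster scatters its index into the 9 wrapped
--     # neighbor cells; ants are then swept once, each incrementing the
--     # counters of every cluster whose neighborhood contains its cell.
--     pairs = [((wrap(c[0] + i), wrap(c[1] + j)), k)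
--              for k, c in enumerate(cluster_centers)
--              for i in (-1, 0, 1)
--              for j in (-1, 0, 1)]
--     index = {}
--     for cell, k in pairs:
--         index[cell] = index.get(cell, []) + [k]
--
--     result = [0] * len(cluster_centers)
--     for p in final_ant_pos:
--         for k in index.get((p[0], p[1]), []):
--             result[k] += 1
--     return result
-- ===== Notes on version B (the rewrite author's own statement) =====
-- stated objective: faster
-- what changed: B inverts the counting direction: each cluster scatters its index into an inverted index keyed by its 9 wrapped neighbor cells, then a single pass over the ants increments, per ant, the counters of exactly the clusters indexed under that ant's cell, instead of A's per-cluster scan of the whole ant list for each of the 9 cells.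
-- outside the precondition, e.g. on ants_in_cluster([[5]], [[0, 0]], 3): A returns [0], B raises IndexError; on ants_in_cluster([[5]], [], 3): A returns [], B raises IndexError
import Mathlib
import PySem

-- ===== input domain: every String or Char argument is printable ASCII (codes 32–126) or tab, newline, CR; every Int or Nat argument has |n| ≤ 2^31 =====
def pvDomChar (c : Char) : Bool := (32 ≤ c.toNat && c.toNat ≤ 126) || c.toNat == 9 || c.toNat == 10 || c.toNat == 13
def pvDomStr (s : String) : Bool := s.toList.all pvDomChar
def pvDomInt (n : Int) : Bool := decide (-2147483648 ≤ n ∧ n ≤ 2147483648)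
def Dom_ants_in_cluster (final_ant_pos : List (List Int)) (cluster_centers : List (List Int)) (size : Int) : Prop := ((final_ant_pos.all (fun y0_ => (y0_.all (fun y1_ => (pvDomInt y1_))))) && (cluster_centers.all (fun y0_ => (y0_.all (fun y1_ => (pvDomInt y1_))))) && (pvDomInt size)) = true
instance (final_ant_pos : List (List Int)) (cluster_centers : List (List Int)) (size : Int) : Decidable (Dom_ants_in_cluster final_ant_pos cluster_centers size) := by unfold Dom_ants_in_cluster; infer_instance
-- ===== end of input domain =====

-- B inverts the counting direction: clusters scatter their index into an inverted index keyed
-- by their 9 wrapped neighbor cells, then one pass over the ants increments the counters of the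
-- clusters indexed under each ant's cell (instead of A's per-cluster scans of the whole ant list).

-- ===== PORT A =====
def ants_in_cluster (final_ant_pos : List (List Int)) (cluster_centers : List (List Int)) (size : Int) : List Int :=
  cluster_centers.foldl (fun ants_in_clust cluster_center =>
    let temp : Int :=
      (PySem.List.pyRange (-1) 2 1).foldl (fun temp i =>
        (PySem.List.pyRange (-1) 2 1).foldl (fun temp j =>
          let x := PySem.List.pyGetD cluster_center 0 0 + i
          let y := PySem.List.pyGetD cluster_center 1 0 + j
          let x := if x = -1 then size - 1 else x
          let x := if x = size then 0 else if x = size + 1 then 1 else x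
          let y := if y = -1 then size - 1 else y
          let y := if y = size then 0 else if y = size + 1 then 1 else y
          final_ant_pos.foldl (fun temp ant_pos =>
            if PySem.List.pyGetD ant_pos 0 0 = x ∧ PySem.List.pyGetD ant_pos 1 0 = y
            then temp + 1 else temp) temp) temp) 0
    ants_in_clust ++ [temp]) []

-- ===== PORT B =====
-- wrap(v) of Source B
def pvWrap (size v : Int) : Int :=
  let v := if v = -1 then size - 1 else v
  if v = size then 0 else if v = size + 1 then 1 else v

def ants_in_cluster_alt (final_ant_pos : List (List Int)) (cluster_centers : List (List Int)) (size : Int) : List Int :=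
  let pairs : List ((Int × Int) × Int) :=
    (PySem.List.enumerate cluster_centers).flatMap (fun kc =>
      ([(-1 : Int), 0, 1]).flatMap (fun i =>
        ([(-1 : Int), 0, 1]).map (fun j =>
          ((pvWrap size (PySem.List.pyGetD kc.2 0 0 + i),
            pvWrap size (PySem.List.pyGetD kc.2 1 0 + j)), kc.1))))
  let index : PySem.Dict (Int × Int) (List Int) :=
    pairs.foldl (fun d q => d.modify q.1 [] (· ++ [q.2])) PySem.Dict.empty
  final_ant_pos.foldl (fun result p =>
    (index.getD (PySem.List.pyGetD p 0 0, PySem.List.pyGetD p 1 0) []).foldl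
      (fun r k => r.modify k.toNat (· + 1)) result)
    (List.replicate cluster_centers.length (0 : Int))

-- ===== PRECONDITION & SPEC =====
-- Pre_ excludes inputs containing a row (ant position or cluster center) with fewer than two
-- coordinates: Python A raises IndexError on most of them, and on the rest (where `and`
-- short-circuiting or an empty cluster list lets A still return) B itself raises IndexError.
def Pre_ants_in_cluster (final_ant_pos : List (List Int)) (cluster_centers : List (List Int)) (size : Int) : Prop :=
  (∀ p ∈ final_ant_pos, 2 ≤ p.length) ∧ (∀ c ∈ cluster_centers, 2 ≤ c.length)
instance (final_ant_pos : List (List Int)) (cluster_centers : List (List Int)) (size : Int) : Decidable (Pre_ants_in_cluster final_ant_pos cluster_centers size) := by unfold Pre_ants_in_cluster; infer_instance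

def pvWitness_ants_in_cluster : List (List Int) × List (List Int) × Int := ([[0, 0], [2, 1]], [[0, 0]], 3)

def Spec_ants_in_cluster (final_ant_pos : List (List Int)) (cluster_centers : List (List Int)) (size : Int) (out : List Int) : Prop := out = ants_in_cluster_alt final_ant_pos cluster_centers size
instance (final_ant_pos : List (List Int)) (cluster_centers : List (List Int)) (size : Int) (out : List Int) : Decidable (Spec_ants_in_cluster final_ant_pos cluster_centers size out) := by unfold Spec_ants_in_cluster; infer_instance

-- ===== CLAIM (what is proved, stated in full; the proofs are below) =====
def Claim_equal_ants_in_cluster : Prop := ∀ (final_ant_pos : List (List Int)) (cluster_centers : List (List Int)) (size : Int), Dom_ants_in_cluster final_ant_pos cluster_centers size → Pre_ants_in_cluster final_ant_pos cluster_centers size → Spec_ants_in_cluster final_ant_pos cluster_centers size (ants_in_cluster final_ant_pos cluster_centers size)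

-- ===== LEMMAS AND PROOFS =====

def pvCell (p : List Int) : Int × Int := (PySem.List.pyGetD p 0 0, PySem.List.pyGetD p 1 0)

def pvNeigh (size : Int) (c : List Int) : List (Int × Int) :=
  ([(-1 : Int), 0, 1]).flatMap (fun i =>
    ([(-1 : Int), 0, 1]).map (fun j =>
      (pvWrap size (PySem.List.pyGetD c 0 0 + i), pvWrap size (PySem.List.pyGetD c 1 0 + j))))

lemma pvEnumSum {α : Type} (h : α → Nat) (v : Int) (cs : List α) (a : Int) :
    ((PySem.List.enumerate cs a).map (fun kc => if kc.1 == v then h kc.2 else 0)).sum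
    = if ha : a ≤ v ∧ v < a + cs.length then h (cs[(v - a).toNat]'(by omega)) else 0 := by
  induction cs generalizing a with
  | nil => simp [PySem.List.enumerate_nil]
  | cons c cs ih =>
    rw [PySem.List.enumerate_cons]
    simp only [List.map_cons, List.sum_cons, ih (a + 1)]
    by_cases hv : a = v
    · subst hv
      rw [if_pos (by simp), dif_neg (by omega), dif_pos (by constructor <;> [omega; simp])]
      simp
    · rw [if_neg (by simpa using fun h => hv h)]
      by_cases hr : a + 1 ≤ v ∧ v < a + 1 + cs.length
      · rw [dif_pos hr, dif_pos (by simp at hr ⊢; omega)]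
        have : (v - a).toNat = (v - (a+1)).toNat + 1 := by omega
        simp [this]
      · rw [dif_neg hr, dif_neg (by simp at hr ⊢; omega)]

lemma pvIndex_count (cs : List (List Int)) (s : Int) (cell : Int × Int) (n : Nat) (hn : n < cs.length) :
    ((((PySem.List.enumerate cs).flatMap (fun kc =>
        ([(-1 : Int), 0, 1]).flatMap (fun i =>
          ([(-1 : Int), 0, 1]).map (fun j =>
            ((pvWrap s (PySem.List.pyGetD kc.2 0 0 + i),
              pvWrap s (PySem.List.pyGetD kc.2 1 0 + j)), kc.1))))).filter
        (fun q => q.1 == cell)).map (·.2)).count ((n : Int))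
    = (pvNeigh s cs[n]).count cell := by
  have h1 : ∀ (l : List ((Int×Int)×Int)) (v : Int),
      ((l.filter (fun q => q.1 == cell)).map (·.2)).count v
      = l.countP (fun q => q.1 == cell && q.2 == v) := by
    intro l v
    simp [List.count, List.countP_map, List.countP_filter, Function.comp, Bool.and_comm]
  rw [h1]
  -- countP over flatMap
  have h3 : ∀ {β γ : Type} (l : List β) (f : β → List γ) (pr : γ → Bool),
      (l.flatMap f).countP pr = (l.map (fun a => (f a).countP pr)).sum := by
    intro β γ l f pr
    induction l with
    | nil => simp
    | cons a l ih => simp [List.countP_append, ih]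
  rw [h3]
  have h4 : ∀ kc : Int × List Int,
      List.countP (fun q => q.1 == cell && q.2 == (n : Int))
        (([(-1 : Int), 0, 1]).flatMap (fun i =>
          ([(-1 : Int), 0, 1]).map (fun j =>
            ((pvWrap s (PySem.List.pyGetD kc.2 0 0 + i),
              pvWrap s (PySem.List.pyGetD kc.2 1 0 + j)), kc.1))))
      = (if kc.1 == (n : Int) then (pvNeigh s kc.2).count cell else 0) := by
    intro kc
    have : (([(-1 : Int), 0, 1]).flatMap (fun i =>
          ([(-1 : Int), 0, 1]).map (fun j =>
            ((pvWrap s (PySem.List.pyGetD kc.2 0 0 + i),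
              pvWrap s (PySem.List.pyGetD kc.2 1 0 + j)), kc.1))))
        = (pvNeigh s kc.2).map (fun xy => (xy, kc.1)) := by
      simp [pvNeigh]
    rw [this, List.countP_map]
    by_cases hk : kc.1 = (n : Int)
    · simp [hk, List.count, Function.comp_def]
    · rw [if_neg (by simpa using hk)]
      simp only [Function.comp_def, List.countP_eq_zero]
      intro a _
      simp [hk]
  rw [List.map_congr_left (fun kc _ => h4 kc)]
  rw [show PySem.List.enumerate cs = PySem.List.enumerate cs 0 from rfl,
    pvEnumSum (fun c => (pvNeigh s c).count cell) (n : Int) cs 0]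
  rw [dif_pos (by constructor <;> omega)]
  simp

lemma pvA_eq (f cs : List (List Int)) (s : Int) :
    ants_in_cluster f cs s
    = cs.map (fun c => ((pvNeigh s c).map (fun xy => (f.countP (fun p => pvCell p == xy) : Int))).sum) := by
  unfold ants_in_cluster
  rw [PySem.List.foldl_append_singleton_eq_map, List.nil_append]
  apply List.map_congr_left
  intro c _
  have hr : PySem.List.pyRange (-1) 2 1 = [-1, 0, 1] := by decide
  rw [hr]
  have hscan : ∀ (x y t : Int),
      f.foldl (fun temp ant_pos =>
        if PySem.List.pyGetD ant_pos 0 0 = x ∧ PySem.List.pyGetD ant_pos 1 0 = y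
        then temp + 1 else temp) t
      = t + (f.countP (fun p => pvCell p == (x, y)) : Int) := by
    intro x y t
    rw [PySem.List.foldl_ite_add_one]
    congr 1
    norm_cast
    apply List.countP_congr
    intro p _
    simp [pvCell, Prod.ext_iff]
  simp only [List.foldl_cons, List.foldl_nil, hscan, pvNeigh, pvWrap, List.flatMap_cons,
    List.map_cons, List.map_nil, List.flatMap_nil, List.append_nil, List.sum_cons,
    List.sum_nil, List.cons_append, List.nil_append]
  ring

set_option maxRecDepth 4096 in
lemma pvCount_swap (N : List (Int × Int)) (F : List (List Int)) :
    (N.map (fun xy => (F.countP (fun p => pvCell p == xy) : Int))).sum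
    = (F.map (fun p => (N.count (pvCell p) : Int))).sum := by
  induction F with
  | nil =>
    simp only [List.countP_nil, Nat.cast_zero, List.map_nil, List.sum_nil]
    simp
  | cons p F ih =>
    simp only [List.countP_cons, List.map_cons, List.sum_cons]
    have : (N.map (fun xy => ((F.countP (fun q => pvCell q == xy)
          + if pvCell p == xy then 1 else 0 : Nat) : Int))).sum
        = (N.map (fun xy => (F.countP (fun q => pvCell q == xy) : Int))).sum
          + (N.map (fun xy => if pvCell p == xy then (1 : Int) else 0)).sum := by
      rw [← PySem.List.sum_map_add_int]
      apply congrArg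
      apply List.map_congr_left
      intro xy _
      push_cast
      split <;> simp
    rw [this, ih]
    have hcnt : (N.map (fun xy => if pvCell p == xy then (1 : Int) else 0)).sum
        = (N.count (pvCell p) : Int) := by
      rw [PySem.List.sum_map_ite_one_zero]
      norm_cast
      rw [List.count]
      apply List.countP_congr
      intro xy _
      simp only [beq_iff_eq]
      exact eq_comm
    rw [hcnt]
    ring

lemma pvInc_len (ks : List Int) (v : List Int) :
    (ks.foldl (fun r k => r.modify k.toNat (· + 1)) v).length = v.length := by
  induction ks generalizing v with
  | nil => rfl
  | cons k ks ih => simp [List.foldl_cons, ih]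

lemma pvInc_get (ks : List Int) (hks : ∀ k ∈ ks, 0 ≤ k) (v : List Int) (n : Nat) (hn : n < v.length) :
    (ks.foldl (fun r k => r.modify k.toNat (· + 1)) v)[n]?
    = some (v[n] + (ks.count ((n : Nat) : Int) : Int)) := by
  induction ks generalizing v with
  | nil => simp [hn]
  | cons k ks ih =>
    simp only [List.foldl_cons]
    have hk0 : 0 ≤ k := hks k List.mem_cons_self
    have hlen : n < (v.modify k.toNat (· + 1)).length := by simpa using hn
    rw [ih (fun k' hk' => hks k' (List.mem_cons_of_mem _ hk')) _ hlen]
    have hget : (v.modify k.toNat (· + 1))[n]'hlen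
        = if k.toNat = n then v[n] + 1 else v[n] := by
      by_cases h : k.toNat = n
      · subst h; simp
      · simp [h]
    rw [hget, List.count_cons]
    by_cases h : k.toNat = n
    · rw [if_pos h, if_pos (by simp; omega)]
      push_cast; ring_nf
    · rw [if_neg h, if_neg (by simp; omega)]
      simp

lemma pvResult_len (f : List (List Int)) (idx : (Int × Int) → List Int) (v : List Int) :
    (f.foldl (fun r p => (idx (pvCell p)).foldl (fun r k => r.modify k.toNat (· + 1)) r) v).length
    = v.length := by
  induction f generalizing v with
  | nil => rfl
  | cons p f ih => rw [List.foldl_cons, ih, pvInc_len]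

lemma pvResult_get (f : List (List Int)) (idx : (Int × Int) → List Int)
    (hpos : ∀ cell k, k ∈ idx cell → 0 ≤ k) (v : List Int) (n : Nat) (hn : n < v.length) :
    (f.foldl (fun r p => (idx (pvCell p)).foldl (fun r k => r.modify k.toNat (· + 1)) r) v)[n]?
    = some (v[n] + (f.map (fun p => ((idx (pvCell p)).count ((n : Nat) : Int) : Int))).sum) := by
  induction f generalizing v with
  | nil => simp [hn]
  | cons p f ih =>
    rw [List.foldl_cons]
    have hlen : n < ((idx (pvCell p)).foldl (fun r k => r.modify k.toNat (· + 1)) v).length := by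
      rw [pvInc_len]; exact hn
    rw [ih _ hlen]
    have := pvInc_get (idx (pvCell p)) (fun k hk => hpos _ k hk) v n hn
    rw [List.getElem?_eq_getElem hlen] at this
    have h2 := Option.some.inj this
    rw [h2]
    simp only [List.map_cons, List.sum_cons]
    congr 1
    ring

-- B unfolded: the inverted index as a function from a cell to the cluster indices stored there
def pvIdx (cluster_centers : List (List Int)) (s : Int) : (Int × Int) → List Int := fun cell =>
  (((PySem.List.enumerate cluster_centers).flatMap (fun kc =>
      ([(-1 : Int), 0, 1]).flatMap (fun i =>
        ([(-1 : Int), 0, 1]).map (fun j =>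
          ((pvWrap s (PySem.List.pyGetD kc.2 0 0 + i),
            pvWrap s (PySem.List.pyGetD kc.2 1 0 + j)), kc.1))))).foldl
    (fun d q => d.modify q.1 [] (· ++ [q.2])) PySem.Dict.empty).getD cell []

lemma pvIdx_eq (cs : List (List Int)) (s : Int) (cell : Int × Int) :
    pvIdx cs s cell
    = (((PySem.List.enumerate cs).flatMap (fun kc =>
        ([(-1 : Int), 0, 1]).flatMap (fun i =>
          ([(-1 : Int), 0, 1]).map (fun j =>
            ((pvWrap s (PySem.List.pyGetD kc.2 0 0 + i),
              pvWrap s (PySem.List.pyGetD kc.2 1 0 + j)), kc.1))))).filter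
        (fun q => q.1 == cell)).map (·.2) := by
  unfold pvIdx
  rw [PySem.Dict.getD_foldl_modify_append]
  rfl

lemma pvIdx_nonneg (cs : List (List Int)) (s : Int) :
    ∀ cell k, k ∈ pvIdx cs s cell → 0 ≤ k := by
  intro cell k hk
  rw [pvIdx_eq] at hk
  simp only [List.mem_map, List.mem_filter, List.mem_flatMap,
    PySem.List.mem_enumerate_iff] at hk
  obtain ⟨q, ⟨⟨kc, ⟨m, hm, rfl⟩, hq⟩, -⟩, rfl⟩ := hk
  obtain ⟨i, -, j, -, rfl⟩ := hq
  simp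

lemma pvB_eq (f cs : List (List Int)) (s : Int) :
    ants_in_cluster_alt f cs s
    = f.foldl (fun r p => (pvIdx cs s (pvCell p)).foldl (fun r k => r.modify k.toNat (· + 1)) r)
        (List.replicate cs.length (0 : Int)) := rfl

-- ===== VERDICT (by name: the statement is the Claim_ definition above) =====
theorem ants_in_cluster_spec : Claim_equal_ants_in_cluster := by
  intro f cs s _ _
  unfold Spec_ants_in_cluster
  rw [pvA_eq, pvB_eq]
  have hlen : (f.foldl (fun r p => (pvIdx cs s (pvCell p)).foldl (fun r k => r.modify k.toNat (· + 1)) r)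
      (List.replicate cs.length (0 : Int))).length = cs.length := by
    rw [pvResult_len, List.length_replicate]
  apply List.ext_getElem (by simpa using hlen.symm)
  intro n hn1 hn2
  have hncs : n < cs.length := by simpa using hn1
  have hrep : n < (List.replicate cs.length (0 : Int)).length := by simpa using hncs
  have hget := pvResult_get f (pvIdx cs s) (pvIdx_nonneg cs s) (List.replicate cs.length (0 : Int)) n hrep
  rw [List.getElem?_eq_getElem hn2] at hget
  rw [Option.some.inj hget]
  rw [List.getElem_map]
  rw [List.getElem_replicate]
  have hcnt : ∀ p ∈ f, ((pvIdx cs s (pvCell p)).count ((n : Nat) : Int) : Int)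
      = ((pvNeigh s cs[n]).count (pvCell p) : Int) := by
    intro p _
    rw [pvIdx_eq, pvIndex_count cs s (pvCell p) n hncs]
  rw [List.map_congr_left hcnt, ← pvCount_swap]
  ring
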